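-- pv_equiv track=rewrite | github.com/Ronny-Zimmermann/TextsFromComics_Prototype | ComicOCR_WIN.py | eliminateEnclosedRectangles
-- ===== SOURCE A (Python) =====
-- def eliminateEnclosedRectangles(rectList):
--
--     eliRectList = []
--
--     # every rectangle in the list is checked against...
--     for i in range(len(rectList)):
--
--         [x1ul,y1ul,w1,h1] = rectList[i]
--
--         # ...every rectangle in the list
--         for j in range(len(rectList)):
--
--             [x2ul,y2ul,w2,h2] = rectList[j]
--
--             # if "1" is not the same rectangle as "2" and every corner
--             # from rectangle "1" is inside rectangle "2", write "1"
--             # in the elimination list and stop the inner for-loop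
--             if rectList[i] != rectList[j] and\
--                x2ul <= x1ul <= x2ul+w2 and\
--                y2ul <= y1ul <= y2ul+h2 and\
--                x2ul <= x1ul+w1 <= x2ul+w2 and\
--                y2ul <= y1ul+h1 <= y2ul+h2:
--
--                    eliRectList.append(rectList[i])
--                    break
--
--     # delete all rectangles from the list that are in the elimination list
--     rectList = [x for x in rectList if x not in eliRectList]
--
--     return rectList
-- ===== SOURCE B (Python) =====
-- def eliminateEnclosedRectangles(rectList):
--     # Sort by size (w+h) descending; a strict container is always strictly larger,
--     # so each rectangle only needs to be checked against the already-kept survivors.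
--     def contains(s, r):
--         x1, y1, w1, h1 = r
--         x2, y2, w2, h2 = s
--         return (x2 <= x1 <= x2 + w2 and y2 <= y1 <= y2 + h2 and
--                 x2 <= x1 + w1 <= x2 + w2 and y2 <= y1 + h1 <= y2 + h2)
--     survivors = []
--     for r in sorted(rectList, key=lambda t: t[2] + t[3], reverse=True):
--         if not any(s != r and contains(s, r) for s in survivors):
--             survivors.append(r)
--     return [r for r in rectList if r in survivors]
-- ===== Notes on version B (the rewrite author's own statement) =====
-- stated objective: alternative
-- what changed: B replaces A's all-pairs break-scan plus elimination-list filtering by a sort-and-survivors algorithm: rectangles are sorted by size (w+h) descending and each is tested only against the already-kept survivors (correct because a strict container is strictly larger and containment is transitive), then the input is filtered by survivor membership.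
import Mathlib
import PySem

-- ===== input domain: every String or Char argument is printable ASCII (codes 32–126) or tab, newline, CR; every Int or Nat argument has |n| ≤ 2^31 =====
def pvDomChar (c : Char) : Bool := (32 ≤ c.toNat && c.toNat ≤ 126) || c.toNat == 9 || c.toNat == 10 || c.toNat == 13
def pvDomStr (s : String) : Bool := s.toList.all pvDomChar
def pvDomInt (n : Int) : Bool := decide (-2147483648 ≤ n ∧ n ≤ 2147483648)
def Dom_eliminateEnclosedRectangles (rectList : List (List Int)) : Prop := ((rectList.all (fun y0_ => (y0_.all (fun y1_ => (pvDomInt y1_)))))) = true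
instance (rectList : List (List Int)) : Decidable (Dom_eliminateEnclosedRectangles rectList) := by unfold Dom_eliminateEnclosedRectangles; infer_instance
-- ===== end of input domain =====

-- B sorts by size (w+h) descending and checks each rectangle only against the
-- already-kept survivors (a strict container is strictly larger, so it survives
-- or is itself enclosed by an even larger survivor); A scans all pairs and filters.

-- ===== PORT A =====
-- A's inner for-loop with break: scan the whole list, stop at the first j whose
-- rectangle differs in value from r and encloses r.  Python destructures each row
-- into 4 coordinates (raising ValueError on rows of other length); those inputs are
-- excluded by Pre_, here the non-4 match arm just continues the scan.
def pvBreakScanA (r : List Int) : List (List Int) → Bool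
  | [] => false
  | s :: t =>
    match r, s with
    | [x1, y1, w1, h1], [x2, y2, w2, h2] =>
      if r ≠ s ∧ x2 ≤ x1 ∧ x1 ≤ x2 + w2 ∧ y2 ≤ y1 ∧ y1 ≤ y2 + h2 ∧
         x2 ≤ x1 + w1 ∧ x1 + w1 ≤ x2 + w2 ∧ y2 ≤ y1 + h1 ∧ y1 + h1 ≤ y2 + h2
      then true else pvBreakScanA r t
    | _, _ => pvBreakScanA r t

def eliminateEnclosedRectangles (rectList : List (List Int)) : List (List Int) :=
  let eliRectList : List (List Int) :=
    rectList.foldl (fun acc r => if pvBreakScanA r rectList then acc ++ [r] else acc) []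
  rectList.filter (fun x => decide (¬ x ∈ eliRectList))

-- ===== PORT B =====
-- contains(s, r): every corner of r lies inside s (false on non-4 rows, which Pre_ excludes).
def pvContains (s r : List Int) : Bool :=
  match r, s with
  | [x1, y1, w1, h1], [x2, y2, w2, h2] =>
    decide (x2 ≤ x1 ∧ x1 ≤ x2 + w2 ∧ y2 ≤ y1 ∧ y1 ≤ y2 + h2 ∧
            x2 ≤ x1 + w1 ∧ x1 + w1 ≤ x2 + w2 ∧ y2 ≤ y1 + h1 ∧ y1 + h1 ≤ y2 + h2)
  | _, _ => false

-- the sort key t[2] + t[3] (only applied to 4-element rows inside Pre_)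
def pvSizeKey (t : List Int) : Int :=
  match t with
  | [_, _, w, h] => w + h
  | _ => 0

def pvBad (acc : List (List Int)) (r : List Int) : Bool :=
  acc.any (fun s => decide (s ≠ r) && pvContains s r)

def eliminateEnclosedRectangles_alt (rectList : List (List Int)) : List (List Int) :=
  let survivors : List (List Int) :=
    (PySem.List.sorted rectList (fun t => pvSizeKey t) true).foldl
      (fun acc r => if pvBad acc r then acc else acc ++ [r]) []
  rectList.filter (fun r => decide (r ∈ survivors))

-- ===== PRECONDITION & SPEC =====
-- Pre_ excludes exactly the inputs where Python A raises ValueError: a row that is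
-- not a 4-element list cannot be unpacked into [x, y, w, h].
def Pre_eliminateEnclosedRectangles (rectList : List (List Int)) : Prop :=
  ∀ r ∈ rectList, r.length = 4
instance (rectList : List (List Int)) : Decidable (Pre_eliminateEnclosedRectangles rectList) := by unfold Pre_eliminateEnclosedRectangles; infer_instance

def pvWitness_eliminateEnclosedRectangles : List (List Int) :=
  [[0, 0, 10, 10], [2, 2, 3, 3], [20, 0, 5, 5]]

def Spec_eliminateEnclosedRectangles (rectList : List (List Int)) (out : List (List Int)) : Prop := out = eliminateEnclosedRectangles_alt rectList
instance (rectList : List (List Int)) (out : List (List Int)) : Decidable (Spec_eliminateEnclosedRectangles rectList out) := by unfold Spec_eliminateEnclosedRectangles; infer_instance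

-- ===== CLAIM (what is proved, stated in full; the proofs are below) =====
def Claim_equal_eliminateEnclosedRectangles : Prop := ∀ (rectList : List (List Int)), Dom_eliminateEnclosedRectangles rectList → Pre_eliminateEnclosedRectangles rectList → Spec_eliminateEnclosedRectangles rectList (eliminateEnclosedRectangles rectList)

-- ===== LEMMAS AND PROOFS =====

-- containment forces 4-element rows with the stated corner inequalities
theorem pvContains_eq_true (s r : List Int) (h : pvContains s r = true) :
    ∃ x1 y1 w1 h1 x2 y2 w2 h2, r = [x1, y1, w1, h1] ∧ s = [x2, y2, w2, h2] ∧
      x2 ≤ x1 ∧ x1 ≤ x2 + w2 ∧ y2 ≤ y1 ∧ y1 ≤ y2 + h2 ∧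
      x2 ≤ x1 + w1 ∧ x1 + w1 ≤ x2 + w2 ∧ y2 ≤ y1 + h1 ∧ y1 + h1 ≤ y2 + h2 := by
  rcases r with _ | ⟨x1, _ | ⟨y1, _ | ⟨w1, _ | ⟨h1, _ | ⟨e1, r'⟩⟩⟩⟩⟩ <;>
    rcases s with _ | ⟨x2, _ | ⟨y2, _ | ⟨w2, _ | ⟨h2, _ | ⟨e2, s'⟩⟩⟩⟩⟩ <;>
      simp_all [pvContains]

-- a strict container is strictly larger in w + h
theorem pvSize_lt_of_contains (s r : List Int) (h : pvContains s r = true) (hne : s ≠ r) :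
    pvSizeKey r < pvSizeKey s := by
  obtain ⟨x1, y1, w1, h1, x2, y2, w2, h2, hr, hs, hh⟩ := pvContains_eq_true s r h
  subst hr; subst hs
  simp only [pvSizeKey]
  simp only [ne_eq, List.cons.injEq, and_true, not_and] at hne
  omega

-- containment is transitive
theorem pvContains_trans (t s r : List Int) (h1 : pvContains t s = true)
    (h2 : pvContains s r = true) : pvContains t r = true := by
  obtain ⟨a1, b1, c1, d1, a2, b2, c2, d2, hs1, ht, hh1⟩ := pvContains_eq_true t s h1
  obtain ⟨x1, y1, w1, h1', x2, y2, w2, h2', hr, hs2, hh2⟩ := pvContains_eq_true s r h2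
  subst ht; subst hr; subst hs2
  simp only [List.cons.injEq, and_true] at hs1
  obtain ⟨e1, e2, e3, e4⟩ := hs1
  subst e1; subst e2; subst e3; subst e4
  simp only [pvContains, decide_eq_true_eq]
  omega

-- the survivor-fold invariant: processing L after prefix P with accumulator acc,
-- where acc is exactly the survivors of P, everything in L is no larger than P's
-- elements and L is size-nonincreasing, yields exactly the survivors of P ++ L.
theorem pvFold_inv :
    ∀ (L P acc : List (List Int)),
      (∀ s ∈ acc, s ∈ P) →
      (∀ r, (∃ s ∈ acc, s ≠ r ∧ pvContains s r = true) ↔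
            (∃ s ∈ P, s ≠ r ∧ pvContains s r = true)) →
      (∀ r ∈ P, (r ∈ acc ↔ ¬ ∃ s ∈ P, s ≠ r ∧ pvContains s r = true)) →
      (∀ s ∈ P, ∀ r ∈ L, pvSizeKey r ≤ pvSizeKey s) →
      L.Pairwise (fun a b => pvSizeKey b ≤ pvSizeKey a) →
      (∀ s ∈ L.foldl (fun acc r => if pvBad acc r then acc else acc ++ [r]) acc, s ∈ P ++ L) ∧
      (∀ r, (∃ s ∈ L.foldl (fun acc r => if pvBad acc r then acc else acc ++ [r]) acc,
               s ≠ r ∧ pvContains s r = true) ↔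
            (∃ s ∈ P ++ L, s ≠ r ∧ pvContains s r = true)) ∧
      (∀ r ∈ P ++ L,
        (r ∈ L.foldl (fun acc r => if pvBad acc r then acc else acc ++ [r]) acc ↔
          ¬ ∃ s ∈ P ++ L, s ≠ r ∧ pvContains s r = true)) := by
  intro L
  induction L with
  | nil =>
    intro P acc h1 h2 h3 _ _
    simp only [List.foldl_nil, List.append_nil]
    exact ⟨h1, h2, h3⟩
  | cons r0 L' ih =>
    intro P acc h1 h2 h3 hcross hpw
    rw [List.pairwise_cons] at hpw
    obtain ⟨hr0, hpw'⟩ := hpw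
    -- r0 cannot strictly contain anything already in P (sizes in P are ≥ size r0)
    have hnoP : ∀ r ∈ P, ¬ (r0 ≠ r ∧ pvContains r0 r = true) := by
      intro r hrP ⟨hne, hc⟩
      have := pvSize_lt_of_contains r0 r hc hne
      have := hcross r hrP r0 (by simp)
      omega
    have key : ∀ acc1,
        (∀ s ∈ acc1, s ∈ P ++ [r0]) →
        (∀ r, (∃ s ∈ acc1, s ≠ r ∧ pvContains s r = true) ↔
              (∃ s ∈ P ++ [r0], s ≠ r ∧ pvContains s r = true)) →
        (∀ r ∈ P ++ [r0], (r ∈ acc1 ↔ ¬ ∃ s ∈ P ++ [r0], s ≠ r ∧ pvContains s r = true)) →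
        (∀ s ∈ L'.foldl (fun acc r => if pvBad acc r then acc else acc ++ [r]) acc1, s ∈ P ++ r0 :: L') ∧
        (∀ r, (∃ s ∈ L'.foldl (fun acc r => if pvBad acc r then acc else acc ++ [r]) acc1,
                 s ≠ r ∧ pvContains s r = true) ↔
              (∃ s ∈ P ++ r0 :: L', s ≠ r ∧ pvContains s r = true)) ∧
        (∀ r ∈ P ++ r0 :: L',
          (r ∈ L'.foldl (fun acc r => if pvBad acc r then acc else acc ++ [r]) acc1 ↔
            ¬ ∃ s ∈ P ++ r0 :: L', s ≠ r ∧ pvContains s r = true)) := by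
      intro acc1 g1 g2 g3
      have hc : ∀ s ∈ P ++ [r0], ∀ r ∈ L', pvSizeKey r ≤ pvSizeKey s := by
        intro s hs r hr
        rcases List.mem_append.mp hs with hs | hs
        · exact hcross s hs r (by simp [hr])
        · simp only [List.mem_singleton] at hs; subst hs; exact hr0 r hr
      have := ih (P ++ [r0]) acc1 g1 g2 g3 hc hpw'
      rwa [List.append_assoc, List.singleton_append] at this
    simp only [List.foldl_cons]
    by_cases hb : pvBad acc r0 = true
    · rw [if_pos hb]
      -- r0 is enclosed by something already in acc
      simp only [pvBad, List.any_eq_true, Bool.and_eq_true, decide_eq_true_eq] at hb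
      obtain ⟨t, htacc, htne, htc⟩ := hb
      apply key acc
      · intro s hs; exact List.mem_append.mpr (Or.inl (h1 s hs))
      · intro r
        rw [h2 r]
        constructor
        · rintro ⟨s, hs, hne, hc⟩
          exact ⟨s, List.mem_append.mpr (Or.inl hs), hne, hc⟩
        · rintro ⟨s, hs, hne, hc⟩
          rcases List.mem_append.mp hs with hs | hs
          · exact ⟨s, hs, hne, hc⟩
          · simp only [List.mem_singleton] at hs; subst hs
            refine ⟨t, h1 t htacc, ?_, pvContains_trans t s r htc hc⟩
            have st := pvSize_lt_of_contains t s htc htne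
            have sr := pvSize_lt_of_contains s r hc hne
            intro heq; subst heq; omega
      · intro r hr
        rcases List.mem_append.mp hr with hrP | hr0'
        · rw [h3 r hrP]
          constructor
          · intro hno hex
            apply hno
            obtain ⟨s, hs, hne, hcon⟩ := hex
            rcases List.mem_append.mp hs with hs | hs
            · exact ⟨s, hs, hne, hcon⟩
            · simp only [List.mem_singleton] at hs; subst hs
              exact absurd ⟨hne, hcon⟩ (hnoP r hrP)
          · intro hno hex
            obtain ⟨s, hs, hne, hcon⟩ := hex
            exact hno ⟨s, List.mem_append.mpr (Or.inl hs), hne, hcon⟩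
        · simp only [List.mem_singleton] at hr0'; subst hr0'
          constructor
          · intro hacc
            have := (h3 r (h1 r hacc)).mp hacc
            exact absurd ⟨t, h1 t htacc, htne, htc⟩ this
          · intro hno
            exact absurd ⟨t, List.mem_append.mpr (Or.inl (h1 t htacc)), htne, htc⟩ hno
    · rw [if_neg hb]
      rw [Bool.not_eq_true] at hb
      have hbnone : ∀ s ∈ acc, ¬ (s ≠ r0 ∧ pvContains s r0 = true) := by
        intro s hs ⟨hne, hcon⟩
        have : pvBad acc r0 = true := by
          simp only [pvBad, List.any_eq_true]
          exact ⟨s, hs, by simp [hne, hcon]⟩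
        rw [this] at hb
        exact Bool.true_eq_false ▸ hb
      apply key (acc ++ [r0])
      · intro s hs
        rcases List.mem_append.mp hs with hs | hs
        · exact List.mem_append.mpr (Or.inl (h1 s hs))
        · exact List.mem_append.mpr (Or.inr hs)
      · intro r
        constructor
        · rintro ⟨s, hs, hne, hcon⟩
          rcases List.mem_append.mp hs with hs | hs
          · obtain ⟨u, hu, hune, huc⟩ := (h2 r).mp ⟨s, hs, hne, hcon⟩
            exact ⟨u, List.mem_append.mpr (Or.inl hu), hune, huc⟩
          · exact ⟨s, List.mem_append.mpr (Or.inr hs), hne, hcon⟩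
        · rintro ⟨s, hs, hne, hcon⟩
          rcases List.mem_append.mp hs with hs | hs
          · obtain ⟨u, hu, hune, huc⟩ := (h2 r).mpr ⟨s, hs, hne, hcon⟩
            exact ⟨u, List.mem_append.mpr (Or.inl hu), hune, huc⟩
          · exact ⟨s, List.mem_append.mpr (Or.inr hs), hne, hcon⟩
      · intro r hr
        have hRHS : (∃ s ∈ P ++ [r0], s ≠ r ∧ pvContains s r = true) ↔
                    (∃ s ∈ P, s ≠ r ∧ pvContains s r = true) ∨ (r0 ≠ r ∧ pvContains r0 r = true) := by
          constructor
          · rintro ⟨s, hs, hne, hcon⟩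
            rcases List.mem_append.mp hs with hs | hs
            · exact Or.inl ⟨s, hs, hne, hcon⟩
            · simp only [List.mem_singleton] at hs; subst hs; exact Or.inr ⟨hne, hcon⟩
          · rintro (⟨s, hs, hne, hcon⟩ | ⟨hne, hcon⟩)
            · exact ⟨s, List.mem_append.mpr (Or.inl hs), hne, hcon⟩
            · exact ⟨r0, List.mem_append.mpr (Or.inr (by simp)), hne, hcon⟩
        rcases List.mem_append.mp hr with hrP | hr0'
        · rw [hRHS]
          have hno0 := hnoP r hrP
          constructor
          · intro hmem
            rcases List.mem_append.mp hmem with hmem | hmem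
            · have := (h3 r hrP).mp hmem
              rintro (h | h)
              · exact this h
              · exact hno0 h
            · simp only [List.mem_singleton] at hmem; subst hmem
              have : ¬ ∃ s ∈ P, s ≠ r ∧ pvContains s r = true := by
                intro hex
                obtain ⟨u, hu, hune, huc⟩ := (h2 r).mpr hex
                exact hbnone u hu ⟨hune, huc⟩
              rintro (h | h)
              · exact this h
              · exact hno0 h
          · intro hno
            have : ¬ ∃ s ∈ P, s ≠ r ∧ pvContains s r = true := fun h => hno (Or.inl h)
            exact List.mem_append.mpr (Or.inl ((h3 r hrP).mpr this))
        · simp only [List.mem_singleton] at hr0'; subst hr0'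
          constructor
          · intro _ hex
            obtain ⟨s, hs, hne, hcon⟩ := hex
            rcases List.mem_append.mp hs with hs | hs
            · obtain ⟨u, hu, hune, huc⟩ := (h2 r).mpr ⟨s, hs, hne, hcon⟩
              exact hbnone u hu ⟨hune, huc⟩
            · simp only [List.mem_singleton] at hs; subst hs; exact hne rfl
          · intro _
            exact List.mem_append.mpr (Or.inr (by simp))

-- characterisation of B's survivor list: r survives iff no other-valued rectangle
-- in the input encloses it
theorem pvSurvivors_char (rectList : List (List Int)) (r : List Int) (hr : r ∈ rectList) :
    (r ∈ (PySem.List.sorted rectList (fun t => pvSizeKey t) true).foldl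
            (fun acc r => if pvBad acc r then acc else acc ++ [r]) [] ↔
      ¬ ∃ s ∈ rectList, s ≠ r ∧ pvContains s r = true) := by
  have hpw := PySem.List.sorted_pairwise_rev rectList (fun t => pvSizeKey t)
  have h := pvFold_inv (PySem.List.sorted rectList (fun t => pvSizeKey t) true) [] []
    (by simp) (by simp) (by simp) (by simp) hpw
  obtain ⟨_, _, h3⟩ := h
  have hrL : r ∈ PySem.List.sorted rectList (fun t => pvSizeKey t) true :=
    (PySem.List.mem_sorted _ _ _ _).mpr hr
  have := h3 r (by simpa using hrL)
  simp only [List.nil_append] at this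
  rw [this]
  constructor
  · intro hno hex
    obtain ⟨s, hs, hne, hcon⟩ := hex
    exact hno ⟨s, (PySem.List.mem_sorted _ _ _ _).mpr hs, hne, hcon⟩
  · intro hno hex
    obtain ⟨s, hs, hne, hcon⟩ := hex
    exact hno ⟨s, (PySem.List.mem_sorted _ _ _ _).mp hs, hne, hcon⟩

-- A's inner break condition at one element coincides with the per-element test.
theorem pvBreakScanA_cons (r s : List Int) (t : List (List Int)) :
    pvBreakScanA r (s :: t) = ((decide (s ≠ r) && pvContains s r) || pvBreakScanA r t) := by
  rcases r with _ | ⟨x1, _ | ⟨y1, _ | ⟨w1, _ | ⟨h1, _ | ⟨e1, r'⟩⟩⟩⟩⟩ <;>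
    rcases s with _ | ⟨x2, _ | ⟨y2, _ | ⟨w2, _ | ⟨h2, _ | ⟨e2, s'⟩⟩⟩⟩⟩ <;>
      simp only [pvBreakScanA, pvContains] <;>
        first
        | (split_ifs with h
           · rw [decide_eq_true (Ne.symm h.1), decide_eq_true h.2]; simp
           · rw [not_and_or] at h
             rcases h with h | h
             · rw [ne_eq, not_not] at h
               simp [h]
             · simp [decide_eq_false h])
        | simp

-- A's break-scan equals an any-scan.
theorem pvBreakScanA_eq_any (r : List Int) (L : List (List Int)) :
    pvBreakScanA r L = L.any (fun s => decide (s ≠ r) && pvContains s r) := by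
  induction L with
  | nil => simp [pvBreakScanA]
  | cons s t ih => rw [pvBreakScanA_cons, ih]; simp

-- Membership in A's accumulated elimination list.
theorem mem_eli_fold (p : List Int → Bool)
    (x : List Int) :
    ∀ (L : List (List Int)) (acc : List (List Int)),
      (x ∈ L.foldl (fun acc r => if p r then acc ++ [r] else acc) acc ↔
        x ∈ acc ∨ (x ∈ L ∧ p x = true)) := by
  intro L
  induction L with
  | nil => intro acc; simp
  | cons s t ih =>
    intro acc
    simp only [List.foldl_cons]
    by_cases hs : p s = true
    · rw [if_pos hs, ih]
      simp only [List.mem_append, List.mem_cons, List.not_mem_nil, or_false]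
      constructor
      · rintro ((h | rfl) | h)
        · exact Or.inl h
        · exact Or.inr ⟨Or.inl rfl, hs⟩
        · exact Or.inr ⟨Or.inr h.1, h.2⟩
      · rintro (h | ⟨(rfl | h), hp⟩)
        · exact Or.inl (Or.inl h)
        · exact Or.inl (Or.inr rfl)
        · exact Or.inr ⟨h, hp⟩
    · rw [if_neg hs, ih]
      simp only [List.mem_cons]
      constructor
      · rintro (h | h)
        · exact Or.inl h
        · exact Or.inr ⟨Or.inr h.1, h.2⟩
      · rintro (h | ⟨(rfl | h), hp⟩)
        · exact Or.inl h
        · exact absurd hp hs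
        · exact Or.inr ⟨h, hp⟩

-- ===== VERDICT (by name: the statement is the Claim_ definition above) =====
theorem eliminateEnclosedRectangles_spec : Claim_equal_eliminateEnclosedRectangles := by
  intro rectList _ _
  unfold Spec_eliminateEnclosedRectangles eliminateEnclosedRectangles eliminateEnclosedRectangles_alt
  apply List.filter_congr
  intro x hx
  have hmem := mem_eli_fold (fun r => pvBreakScanA r rectList) x rectList []
  have hscan := pvBreakScanA_eq_any x rectList
  have hsurv := pvSurvivors_char rectList x hx
  by_cases h : ∃ s ∈ rectList, s ≠ x ∧ pvContains s x = true
  · have hp : pvBreakScanA x rectList = true := by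
      rw [hscan]
      simp only [List.any_eq_true, Bool.and_eq_true, decide_eq_true_eq]
      obtain ⟨s, hs, hne, hc⟩ := h
      exact ⟨s, hs, hne, hc⟩
    have hxin : x ∈ rectList.foldl (fun acc r => if pvBreakScanA r rectList then acc ++ [r] else acc) [] := by
      rw [hmem]; exact Or.inr ⟨hx, hp⟩
    have hxout : ¬ x ∈ (PySem.List.sorted rectList (fun t => pvSizeKey t) true).foldl
        (fun acc r => if pvBad acc r then acc else acc ++ [r]) [] := by
      intro hc; exact (hsurv.mp hc) h
    simp [hxin, hxout]
  · have hp : pvBreakScanA x rectList = false := by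
      rw [hscan]
      rw [List.any_eq_false]
      intro s hs
      simp only [Bool.and_eq_true, decide_eq_true_eq, not_and]
      intro hne hc
      exact h ⟨s, hs, hne, hc⟩
    have hxout : ¬ x ∈ rectList.foldl (fun acc r => if pvBreakScanA r rectList then acc ++ [r] else acc) [] := by
      rw [hmem]; simp [hp]
    have hxin : x ∈ (PySem.List.sorted rectList (fun t => pvSizeKey t) true).foldl
        (fun acc r => if pvBad acc r then acc else acc ++ [r]) [] := hsurv.mpr h
    simp [hxin, hxout]
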